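-- pv_equiv track=rewrite | github.com/WallerTsai/OJ-Solution | leetcode-py/动态规划/其他线性DP/多维DP/No3725.py | countCoprime
-- ===== SOURCE A (Python) =====
-- from collections import Counter
-- from functools import cache
-- from math import gcd
-- from typing import List
--
-- def countCoprime(mat: List[List[int]]) -> int:
--     MOD =  10 ** 9 + 7
--     n, m = len(mat), len(mat[0])
--     cnt = dict()
--     for i, li in enumerate(mat):
--         cnt[i] = Counter(li)
--
--
--     @cache
--     def dfs(i: int, t: int):
--         if t == 1:
--             res = pow(m, n - i) % MOD
--             return res
--
--         if i == n and t != 1: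
--             return 0
--
--         total = 0
--         d = cnt[i]
--         for k, v in d.items():
--             n_t = gcd(t, k)
--             total = (total + v * dfs(i + 1, n_t)) % MOD
--
--         return total
--
--     ans = dfs(0, 0) % MOD
--
--     return ans  # 2119ms
-- ===== SOURCE B (Python) =====
-- from collections import Counter
-- from math import gcd
--
-- def countCoprime(mat):
--     MOD = 10 ** 9 + 7
--     n, m = len(mat), len(mat[0])
--     dp = {0: 1}          # gcd-so-far -> number of weighted ways (mod MOD); never contains 1
--     ans = 0
--     for i, row in enumerate(mat):
--         cnt = Counter(row)
--         rem = n - i - 1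
--         ndp = {}
--         for g, w in dp.items():
--             for k, v in cnt.items():
--                 ng = gcd(g, k)
--                 if ng == 1:
--                     # gcd 1 is absorbing: the remaining rows are free choices
--                     ans = (ans + w * v * pow(m, rem, MOD)) % MOD
--                 else:
--                     ndp[ng] = (ndp.get(ng, 0) + w * v) % MOD
--         dp = ndp
--     return ans % MOD
-- ===== Notes on version B (the rewrite author's own statement) =====
-- stated objective: alternative
-- what changed: Replaces the memoized top-down dfs recursion with an iterative forward DP over the rows carrying a dict from gcd-so-far to weighted count, paying out states that reach gcd 1 immediately via modular pow.
import Mathlib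
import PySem

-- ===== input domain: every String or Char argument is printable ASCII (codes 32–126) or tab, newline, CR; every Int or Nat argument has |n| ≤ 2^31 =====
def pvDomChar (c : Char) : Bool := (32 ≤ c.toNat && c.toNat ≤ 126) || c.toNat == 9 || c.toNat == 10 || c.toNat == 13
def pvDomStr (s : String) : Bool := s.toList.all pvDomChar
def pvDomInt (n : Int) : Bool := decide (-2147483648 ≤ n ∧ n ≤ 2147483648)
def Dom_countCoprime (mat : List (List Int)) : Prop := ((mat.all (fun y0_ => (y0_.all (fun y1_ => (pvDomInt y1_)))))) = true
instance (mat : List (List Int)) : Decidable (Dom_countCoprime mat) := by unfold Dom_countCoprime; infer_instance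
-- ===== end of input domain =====

-- B replaces the memoized top-down dfs by an iterative forward DP over the rows (dict gcd → weighted count,
-- absorbed gcd-1 states paid out immediately); equivalence of return values is proved on nonempty matrices.

-- ===== PORT A =====
def pvMOD : Int := 10 ^ 9 + 7

-- dfs(i, t) of A, recursing over the list of remaining per-row Counters (rows = cnt[i..n-1], so n - i = rows.length)
def pvDfsA (m : Int) : List (PySem.Dict Int Int) → Int → Int
  | rows, t =>
    if t = 1 then (m ^ rows.length) % pvMOD
    else
      match rows with
      | [] => 0
      | d :: rest =>
        d.items.foldl (fun total kv => (total + kv.2 * pvDfsA m rest (Int.gcd t kv.1)) % pvMOD) 0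

def countCoprime (mat : List (List Int)) : Int :=
  let m : Int := (mat.headD []).length   -- len(mat[0]); Pre_ excludes mat = [] where Python raises IndexError
  let cnt : List (PySem.Dict Int Int) := mat.map (fun li => PySem.Dict.counter li)
  (pvDfsA m cnt 0) % pvMOD

-- ===== PORT B =====
-- inner loop body: for k, v in cnt.items()
def pvInnerB (m : Int) (rem : Nat) (g w : Int) (st : PySem.Dict Int Int × Int) (kv : Int × Int) :
    PySem.Dict Int Int × Int :=
  let ng : Int := Int.gcd g kv.1
  if ng = 1 then (st.1, (st.2 + w * kv.2 * PySem.Int.powMod m rem pvMOD) % pvMOD)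
  else (st.1.insert ng ((st.1.getD ng 0 + w * kv.2) % pvMOD), st.2)

-- one row: for g, w in dp.items(): for k, v in cnt.items(): …
def pvRowB (m : Int) (rem : Nat) (cnt : PySem.Dict Int Int) (dp : PySem.Dict Int Int) (ans : Int) :
    PySem.Dict Int Int × Int :=
  dp.items.foldl (fun st gw => cnt.items.foldl (pvInnerB m rem gw.1 gw.2) st) (PySem.Dict.empty, ans)

def pvLoopB (m : Int) : List (List Int) → PySem.Dict Int Int → Int → Int
  | [], _, ans => ans % pvMOD
  | row :: rest, dp, ans =>
    let st := pvRowB m rest.length (PySem.Dict.counter row) dp ans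
    pvLoopB m rest st.1 st.2

def countCoprime_alt (mat : List (List Int)) : Int :=
  let m : Int := (mat.headD []).length   -- len(mat[0]); B raises on mat = [] just like A
  pvLoopB m mat (PySem.Dict.empty.insert 0 1) 0

-- ===== PRECONDITION & SPEC =====
-- Pre_ excludes only the empty matrix, on which both A and B raise IndexError at len(mat[0]).
def Pre_countCoprime (mat : List (List Int)) : Prop := mat ≠ []
instance (mat : List (List Int)) : Decidable (Pre_countCoprime mat) := by unfold Pre_countCoprime; infer_instance

def pvWitness_countCoprime : List (List Int) := [[2, 3], [4, 5]]

def Spec_countCoprime (mat : List (List Int)) (out : Int) : Prop := out = countCoprime_alt mat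
instance (mat : List (List Int)) (out : Int) : Decidable (Spec_countCoprime mat out) := by unfold Spec_countCoprime; infer_instance

-- ===== CLAIM (what is proved, stated in full; the proofs are below) =====
def Claim_equal_countCoprime : Prop := ∀ (mat : List (List Int)), Dom_countCoprime mat → Pre_countCoprime mat → Spec_countCoprime mat (countCoprime mat)

-- ===== LEMMAS AND PROOFS =====

-- the common mathematical value of dfs(i, t) in ZMod (rows = rows i..n-1 of mat)
def pvF (m : ZMod 1000000007) : List (List Int) → Int → ZMod 1000000007
  | rows, t =>
    if t = 1 then m ^ rows.length
    else
      match rows with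
      | [] => 0
      | row :: rest =>
        ((PySem.Dict.counter (κ := Int) row).items.map
          (fun kv => (kv.2 : ZMod 1000000007) * pvF m rest (Int.gcd t kv.1))).sum

-- weighted sum of an association list against pvF
def pvW (m : ZMod 1000000007) (rows : List (List Int)) (l : List (Int × Int)) : ZMod 1000000007 :=
  (l.map (fun gw => (gw.2 : ZMod 1000000007) * pvF m rows gw.1)).sum

lemma pvCast (a : Int) : ((a % pvMOD : Int) : ZMod 1000000007) = (a : ZMod 1000000007) := by
  have h0 : ((pvMOD : Int) : ZMod 1000000007) = 0 := by
    have := ZMod.natCast_self 1000000007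
    push_cast [pvMOD]
    exact_mod_cast this
  conv_rhs => rw [← Int.mul_ediv_add_emod a pvMOD]
  push_cast [h0]
  ring

lemma pvCast_foldl_mod (g : Int × Int → Int) (l : List (Int × Int)) (a : Int) :
    ((l.foldl (fun total kv => (total + kv.2 * g kv) % pvMOD) a : Int) : ZMod 1000000007)
      = (a : ZMod 1000000007)
        + (l.map (fun kv => (kv.2 : ZMod 1000000007) * (g kv : ZMod 1000000007))).sum := by
  induction l generalizing a with
  | nil => simp
  | cons kv tl ih =>
    simp only [List.foldl_cons, List.map_cons, List.sum_cons, ih, pvCast]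
    push_cast
    ring

lemma pvCastA (m : Int) : ∀ (mat : List (List Int)) (t : Int),
    ((pvDfsA m (mat.map (fun li => PySem.Dict.counter li)) t : Int) : ZMod 1000000007)
      = pvF (m : ZMod 1000000007) mat t := by
  intro mat
  induction mat with
  | nil =>
    intro t
    by_cases ht : t = 1 <;> simp [pvDfsA, pvF, ht, pvCast]
  | cons row rest ih =>
    intro t
    by_cases ht : t = 1
    · simp [pvDfsA, pvF, ht, pvCast]
    · have hfold := pvCast_foldl_mod
        (fun kv => pvDfsA m (rest.map (fun li => PySem.Dict.counter li)) (Int.gcd t kv.1))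
        (PySem.Dict.counter (κ := Int) row).items 0
      simp only [List.map_cons, pvDfsA, pvF, ht, if_false] at *
      rw [hfold]
      simp [ih]

lemma pv_sum_map_replace (h : Int × Int → ZMod 1000000007) :
    ∀ (l : List (Int × Int)) (k x v0 : Int), (l.map Prod.fst).Nodup → (k, v0) ∈ l →
    ((l.map (fun p => if p.1 == k then (k, x) else p)).map h).sum
      = (l.map h).sum - h (k, v0) + h (k, x) := by
  intro l
  induction l with
  | nil => intro k x v0 _ hmem; cases hmem
  | cons p tl ih =>
    intro k x v0 hnd hmem
    simp only [List.map_cons, List.nodup_cons] at hnd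
    obtain ⟨hp, hndtl⟩ := hnd
    by_cases hpk : p.1 = k
    · have hv0 : p = (k, v0) := by
        rcases List.mem_cons.mp hmem with h1 | h1
        · exact h1.symm
        · exact absurd (hpk ▸ (List.mem_map_of_mem h1 : (k, v0).1 ∈ tl.map Prod.fst)) hp
      have htl : tl.map (fun q => if q.1 == k then (k, x) else q) = tl := by
        have : ∀ q ∈ tl, (fun q : Int × Int => if q.1 == k then (k, x) else q) q = id q := by
          intro q hq
          have hqk : q.1 ≠ k := by
            intro hc
            exact hp (hpk ▸ hc ▸ (List.mem_map_of_mem hq : q.1 ∈ tl.map Prod.fst))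
          simp [hqk]
        rw [List.map_congr_left this, List.map_id]
      simp only [List.map_cons, List.sum_cons, hv0, htl, BEq.rfl, if_true]
      ring
    · have hmemtl : (k, v0) ∈ tl := by
        rcases List.mem_cons.mp hmem with h1 | h1
        · exact absurd (h1 ▸ rfl : p.1 = k) hpk
        · exact h1
      have hbeq : (p.1 == k) = false := by simp [hpk]
      simp only [List.map_cons, List.sum_cons, hbeq, Bool.false_eq_true, if_false,
        ih k x v0 hndtl hmemtl]
      ring

lemma pvW_insert (m : ZMod 1000000007) (rows : List (List Int)) (d : PySem.Dict Int Int)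
    (hnd : d.keys.Nodup) (k x : Int) :
    pvW m rows (d.insert k x).items
      = pvW m rows d.items - ((d.getD k 0 : Int) : ZMod 1000000007) * pvF m rows k
          + (x : ZMod 1000000007) * pvF m rows k := by
  by_cases hc : d.contains k
  · obtain ⟨v0, hv0⟩ : ∃ v0, d.get? k = some v0 := by
      have := PySem.Dict.contains_eq_isSome_get? d k
      rw [hc] at this
      exact Option.isSome_iff_exists.mp this.symm
    have hmem : (k, v0) ∈ d.items := PySem.Dict.mem_items_of_get?_eq_some d hv0
    have hgetD : d.getD k 0 = v0 := by rw [PySem.Dict.getD_eq_get?_getD, hv0]; rfl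
    have hnd' : (d.items.map Prod.fst).Nodup := hnd
    rw [PySem.Dict.items_insert_of_contains d x hc]
    unfold pvW
    rw [pv_sum_map_replace (fun gw => (gw.2 : ZMod 1000000007) * pvF m rows gw.1)
      d.items k x v0 hnd' hmem, hgetD]
  · rw [PySem.Dict.items_insert_of_not_contains d x (by simpa using hc),
      PySem.Dict.getD_of_not_contains d 0 (by simpa using hc)]
    unfold pvW
    simp only [List.map_append, List.sum_append, List.map_cons, List.map_nil, List.sum_cons,
      List.sum_nil]
    push_cast
    ring

lemma pvInnerB_inv (m : Int) (rows : List (List Int)) (g w : Int) :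
    ∀ (l : List (Int × Int)) (d : PySem.Dict Int Int) (a : Int), d.keys.Nodup → 1 ∉ d.keys →
      (l.foldl (pvInnerB m rows.length g w) (d, a)).1.keys.Nodup
      ∧ 1 ∉ (l.foldl (pvInnerB m rows.length g w) (d, a)).1.keys
      ∧ (((l.foldl (pvInnerB m rows.length g w) (d, a)).2 : ZMod 1000000007)
           + pvW (m : ZMod 1000000007) rows (l.foldl (pvInnerB m rows.length g w) (d, a)).1.items
         = (a : ZMod 1000000007) + pvW (m : ZMod 1000000007) rows d.items
           + (w : ZMod 1000000007)
             * (l.map (fun kv => (kv.2 : ZMod 1000000007)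
                 * pvF (m : ZMod 1000000007) rows (Int.gcd g kv.1))).sum) := by
  intro l
  induction l with
  | nil =>
    intro d a hnd hone
    exact ⟨hnd, hone, by simp⟩
  | cons kv tl ih =>
    intro d a hnd hone
    by_cases hng : ((Int.gcd g kv.1 : Int)) = 1
    · simp only [List.foldl_cons, pvInnerB, hng, if_true]
      obtain ⟨h1, h2, h3⟩ := ih d ((a + w * kv.2 * PySem.Int.powMod m rows.length pvMOD) % pvMOD) hnd hone
      refine ⟨h1, h2, ?_⟩
      rw [h3]
      have hpow : ((PySem.Int.powMod m rows.length pvMOD : Int) : ZMod 1000000007)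
          = (m : ZMod 1000000007) ^ rows.length := by
        have hm : PySem.Int.powMod m rows.length pvMOD = (m ^ rows.length) % pvMOD := by
          unfold PySem.Int.powMod
          rw [PySem.Int.mod_eq_emod_of_pos]
          norm_num [pvMOD]
        rw [hm, pvCast]
        push_cast
        ring
      have hF1 : pvF (m : ZMod 1000000007) rows ((Int.gcd g kv.1 : Int))
          = (m : ZMod 1000000007) ^ rows.length := by
        rw [hng]
        cases rows <;> simp [pvF]
      simp only [List.map_cons, List.sum_cons, hF1, pvCast]
      push_cast [hpow]
      ring
    · simp only [List.foldl_cons, pvInnerB, hng, if_false]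
      have hnd' : (d.insert ((Int.gcd g kv.1 : Int)) ((d.getD ((Int.gcd g kv.1 : Int)) 0 + w * kv.2) % pvMOD)).keys.Nodup :=
        PySem.Dict.nodup_keys_insert d _ _ hnd
      have hone' : (1 : Int) ∉ (d.insert ((Int.gcd g kv.1 : Int)) ((d.getD ((Int.gcd g kv.1 : Int)) 0 + w * kv.2) % pvMOD)).keys := by
        rw [PySem.Dict.mem_keys_insert]
        rintro (h | h)
        · exact hng h.symm
        · exact hone h
      obtain ⟨h1, h2, h3⟩ := ih _ a hnd' hone'
      refine ⟨h1, h2, ?_⟩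
      rw [h3, pvW_insert _ _ _ hnd]
      simp only [List.map_cons, List.sum_cons, pvCast]
      push_cast
      ring

lemma pvRowB_inv (m : Int) (rows : List (List Int)) (row : List Int) :
    ∀ (dpl : List (Int × Int)) (d : PySem.Dict Int Int) (a : Int), d.keys.Nodup → 1 ∉ d.keys →
      (dpl.foldl (fun st gw => (PySem.Dict.counter row).items.foldl (pvInnerB m rows.length gw.1 gw.2) st) (d, a)).1.keys.Nodup
      ∧ 1 ∉ (dpl.foldl (fun st gw => (PySem.Dict.counter row).items.foldl (pvInnerB m rows.length gw.1 gw.2) st) (d, a)).1.keys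
      ∧ (((dpl.foldl (fun st gw => (PySem.Dict.counter row).items.foldl (pvInnerB m rows.length gw.1 gw.2) st) (d, a)).2 : ZMod 1000000007)
           + pvW (m : ZMod 1000000007) rows (dpl.foldl (fun st gw => (PySem.Dict.counter row).items.foldl (pvInnerB m rows.length gw.1 gw.2) st) (d, a)).1.items
         = (a : ZMod 1000000007) + pvW (m : ZMod 1000000007) rows d.items
           + (dpl.map (fun gw => (gw.2 : ZMod 1000000007)
               * ((PySem.Dict.counter (κ := Int) row).items.map
                   (fun kv => (kv.2 : ZMod 1000000007)
                     * pvF (m : ZMod 1000000007) rows (Int.gcd gw.1 kv.1))).sum)).sum) := by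
  intro dpl
  induction dpl with
  | nil =>
    intro d a hnd hone
    exact ⟨hnd, hone, by simp⟩
  | cons gw tl ih =>
    intro d a hnd hone
    simp only [List.foldl_cons]
    obtain ⟨h1, h2, h3⟩ := pvInnerB_inv m rows gw.1 gw.2 (PySem.Dict.counter row).items d a hnd hone
    obtain ⟨h1', h2', h3'⟩ := ih ((PySem.Dict.counter (κ := Int) row).items.foldl (pvInnerB m rows.length gw.1 gw.2) (d, a)).1
      ((PySem.Dict.counter (κ := Int) row).items.foldl (pvInnerB m rows.length gw.1 gw.2) (d, a)).2 h1 h2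
    refine ⟨h1', h2', ?_⟩
    rw [h3'] at *
    rw [h3]
    simp only [List.map_cons, List.sum_cons]
    ring

lemma pvLoopB_inv (m : Int) : ∀ (rows : List (List Int)) (dp : PySem.Dict Int Int) (ans : Int),
    dp.keys.Nodup → 1 ∉ dp.keys →
    ((pvLoopB m rows dp ans : Int) : ZMod 1000000007)
      = (ans : ZMod 1000000007) + pvW (m : ZMod 1000000007) rows dp.items := by
  intro rows
  induction rows with
  | nil =>
    intro dp ans hnd hone
    have hz : pvW (m : ZMod 1000000007) [] dp.items = 0 := by
      unfold pvW
      apply List.sum_eq_zero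
      intro x hx
      obtain ⟨gw, hgw, rfl⟩ := List.mem_map.mp hx
      have hne : gw.1 ≠ 1 := fun hc => hone (hc ▸ List.mem_map_of_mem hgw)
      simp [pvF, hne]
    rw [hz]
    simp [pvLoopB, pvCast]
  | cons row rest ih =>
    intro dp ans hnd hone
    obtain ⟨h1, h2, h3⟩ := pvRowB_inv m rest row dp.items PySem.Dict.empty ans
      (by simp [PySem.Dict.keys, PySem.Dict.empty]) (by simp [PySem.Dict.keys, PySem.Dict.empty])
    simp only [pvLoopB, pvRowB]
    rw [ih _ _ h1 h2, h3]
    have hW : pvW (m : ZMod 1000000007) (row :: rest) dp.items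
        = (dp.items.map (fun gw => (gw.2 : ZMod 1000000007)
            * ((PySem.Dict.counter (κ := Int) row).items.map
                (fun kv => (kv.2 : ZMod 1000000007)
                  * pvF (m : ZMod 1000000007) rest (Int.gcd gw.1 kv.1))).sum)).sum := by
      unfold pvW
      congr 1
      apply List.map_congr_left
      intro gw hgw
      have hne : gw.1 ≠ 1 := fun hc => hone (hc ▸ List.mem_map_of_mem hgw)
      simp [pvF, hne]
    rw [hW]
    simp [pvW, PySem.Dict.empty]

lemma pvLoopB_range (m : Int) : ∀ (rows : List (List Int)) (dp : PySem.Dict Int Int) (ans : Int),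
    0 ≤ pvLoopB m rows dp ans ∧ pvLoopB m rows dp ans < pvMOD := by
  intro rows
  induction rows with
  | nil =>
    intro dp ans
    have hpos : (0 : Int) < pvMOD := by norm_num [pvMOD]
    exact ⟨Int.emod_nonneg ans (by omega), Int.emod_lt_of_pos ans hpos⟩
  | cons row rest ih =>
    intro dp ans
    exact ih _ _

-- ===== VERDICT (by name: the statement is the Claim_ definition above) =====
theorem countCoprime_spec : Claim_equal_countCoprime := by
  intro mat _ _
  unfold Spec_countCoprime countCoprime countCoprime_alt
  set m : Int := ((mat.headD []).length : Int) with hm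
  set A := pvDfsA m (mat.map (fun li => PySem.Dict.counter li)) 0 with hA
  set B := pvLoopB m mat (PySem.Dict.empty.insert 0 1) 0 with hB
  have hnd0 : (PySem.Dict.empty.insert (0 : Int) (1 : Int)).keys.Nodup := by decide
  have hone0 : (1 : Int) ∉ (PySem.Dict.empty.insert (0 : Int) (1 : Int)).keys := by decide
  have hcast : ((A % pvMOD : Int) : ZMod 1000000007) = ((B : Int) : ZMod 1000000007) := by
    rw [pvCast, hA, pvCastA, hB, pvLoopB_inv m mat _ 0 hnd0 hone0]
    have hitems : (PySem.Dict.empty.insert (0 : Int) (1 : Int)).items = [((0 : Int), (1 : Int))] := by decide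
    rw [hitems]
    simp [pvW]
  have hBr := pvLoopB_range m mat (PySem.Dict.empty.insert 0 1) 0
  have hpos : (0 : Int) < pvMOD := by norm_num [pvMOD]
  have hAr : 0 ≤ A % pvMOD ∧ A % pvMOD < pvMOD :=
    ⟨Int.emod_nonneg A (by omega), Int.emod_lt_of_pos A hpos⟩
  have hmod : (A % pvMOD) % pvMOD = B % pvMOD := by
    have := (ZMod.intCast_eq_intCast_iff (A % pvMOD) B 1000000007).mp hcast
    have h2 : (A % pvMOD) % (1000000007 : Int) = B % (1000000007 : Int) := by
      simpa [Int.ModEq] using this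
    have hM : pvMOD = (1000000007 : Int) := by norm_num [pvMOD]
    rw [hM]
    exact h2
  calc A % pvMOD = (A % pvMOD) % pvMOD := (Int.emod_eq_of_lt hAr.1 hAr.2).symm
    _ = B % pvMOD := hmod
    _ = B := Int.emod_eq_of_lt hBr.1 hBr.2
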